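-- pv_equiv track=rewrite | github.com/CompEpigen/methylseq_simulation | simulation.py | _long_read_cpg_sample
-- ===== SOURCE A (Python) =====
-- def _long_read_cpg_sample(r_start: int, r_seq: str, dmr):
-- 	cpg_loci = list()
-- 	before_dmr = 0
-- 	after_dmr = 0
-- 	for j in range(len(r_seq) - 1):
-- 		if r_seq[j:j+2] == "CG":
-- 			cpg_loci.append(j)
-- 			if r_start + j < dmr["start"]:
-- 				before_dmr += 1
-- 			elif r_start + j > dmr["end"]:
-- 				after_dmr +=1
-- 	return cpg_loci, before_dmr, after_dmr
-- ===== SOURCE B (Python) =====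
-- def _bisect_left(a, x):
--     lo, hi = 0, len(a)
--     while lo < hi:
--         mid = (lo + hi) // 2
--         if a[mid] < x:
--             lo = mid + 1
--         else:
--             hi = mid
--     return lo
--
--
-- def _bisect_right(a, x):
--     lo, hi = 0, len(a)
--     while lo < hi:
--         mid = (lo + hi) // 2
--         if a[mid] <= x:
--             lo = mid + 1
--         else:
--             hi = mid
--     return lo
--
--
-- def _long_read_cpg_sample(r_start: int, r_seq: str, dmr):
--     cpg_loci = [j for j in range(len(r_seq) - 1) if r_seq[j:j+2] == "CG"]
--     if not cpg_loci:
--         return cpg_loci, 0, 0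
--     before_dmr = _bisect_left(cpg_loci, dmr["start"] - r_start)
--     after_dmr = len(cpg_loci) - _bisect_right(cpg_loci, dmr["end"] - r_start)
--     return cpg_loci, before_dmr, after_dmr
-- ===== Notes on version B (the rewrite author's own statement) =====
-- stated objective: alternative
-- what changed: A's single fused loop with three inline counters is split into a comprehension that builds the sorted list of CpG indices plus a binary-search (bisect_left/bisect_right) counting step for the before/after counts.
-- outside the precondition, e.g. on _long_read_cpg_sample(0, 'CGAT', {'start': 9}): A returns ([0], 1, 0), B raises KeyError; on _long_read_cpg_sample(0, 'AACG', {'start': 5, 'end': 1}): A returns ([2], 1, 0), B returns ([2], 1, 1)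
import Mathlib
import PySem

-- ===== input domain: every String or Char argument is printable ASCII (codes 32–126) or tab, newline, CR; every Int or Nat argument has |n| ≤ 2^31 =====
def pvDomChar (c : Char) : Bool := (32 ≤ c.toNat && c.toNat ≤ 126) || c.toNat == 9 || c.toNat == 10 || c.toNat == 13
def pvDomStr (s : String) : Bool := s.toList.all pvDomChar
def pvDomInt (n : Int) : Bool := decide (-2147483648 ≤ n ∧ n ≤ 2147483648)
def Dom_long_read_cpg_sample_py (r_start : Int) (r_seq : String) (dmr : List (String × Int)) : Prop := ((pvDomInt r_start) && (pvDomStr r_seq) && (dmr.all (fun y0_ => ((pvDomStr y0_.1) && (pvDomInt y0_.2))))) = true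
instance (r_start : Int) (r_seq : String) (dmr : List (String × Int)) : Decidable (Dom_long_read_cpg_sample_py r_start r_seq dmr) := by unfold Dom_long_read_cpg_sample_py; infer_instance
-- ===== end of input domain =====

-- B replaces A's single fused loop (inline before/after counters) by a CpG-index list built by a
-- comprehension plus binary-search (bisect) counting of the before/after totals; return value only.

-- ===== PORT A =====
def long_read_cpg_sample_py (r_start : Int) (r_seq : String) (dmr : List (String × Int)) : List Int × Int × Int :=
  let cs := r_seq.toList
  (PySem.List.pyRange 0 ((cs.length : Int) - 1) 1).foldl
    (fun (acc : List Int × Int × Int) (j : Int) =>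
      if PySem.List.slice cs (some j) (some (j + 2)) = ['C', 'G'] then
        -- cpg_loci.append(j)
        let acc' : List Int × Int × Int := (acc.1 ++ [j], acc.2.1, acc.2.2)
        if r_start + j < (dmr.lookup "start").getD 0 then  -- getD 0: Pre_ excludes the KeyError
          (acc'.1, acc'.2.1 + 1, acc'.2.2)
        else if r_start + j > (dmr.lookup "end").getD 0 then
          (acc'.1, acc'.2.1, acc'.2.2 + 1)
        else acc'
      else acc)
    ([], 0, 0)

-- ===== PORT B =====
-- Source B's hand-written _bisect_left/_bisect_right are exactly the lo/hi binary-search loop of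
-- PySem.List.bisectLeft / bisectRight (same loop, same floor midpoint), so they are ported as those.
def long_read_cpg_sample_py_alt (r_start : Int) (r_seq : String) (dmr : List (String × Int)) : List Int × Int × Int :=
  let cs := r_seq.toList
  let cpg_loci : List Int := (PySem.List.pyRange 0 ((cs.length : Int) - 1) 1).filter
      (fun j => decide (PySem.List.slice cs (some j) (some (j + 2)) = ['C', 'G']))
  if cpg_loci = [] then (cpg_loci, 0, 0)   -- Source B: if not cpg_loci: return cpg_loci, 0, 0
  else
    let before_dmr : Int := (PySem.List.bisectLeft cpg_loci ((dmr.lookup "start").getD 0 - r_start) : Nat)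
    let after_dmr : Int := (cpg_loci.length : Int) - (PySem.List.bisectRight cpg_loci ((dmr.lookup "end").getD 0 - r_start) : Nat)
    (cpg_loci, before_dmr, after_dmr)

-- ===== PRECONDITION & SPEC =====
-- When the read contains a CpG, Pre_ excludes dmr mappings missing the "start" or "end" key (A raises
-- KeyError on some such inputs and B on all of them; A still returns when the missing "end" is never
-- reached, which B cannot match without raising) and malformed DMRs with end < start, where A's elif
-- credits a straddling CpG to before only while B counts it on both sides — both readings are
-- defensible for an empty interval.
def Pre_long_read_cpg_sample_py (r_start : Int) (r_seq : String) (dmr : List (String × Int)) : Prop :=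
  (¬ ['C', 'G'] <:+: r_seq.toList) ∨
    ((dmr.lookup "start").isSome = true ∧ (dmr.lookup "end").isSome = true ∧
      (dmr.lookup "start").getD 0 ≤ (dmr.lookup "end").getD 0)
instance (r_start : Int) (r_seq : String) (dmr : List (String × Int)) : Decidable (Pre_long_read_cpg_sample_py r_start r_seq dmr) := by unfold Pre_long_read_cpg_sample_py; infer_instance

def pvWitness_long_read_cpg_sample_py : Int × String × (List (String × Int)) := (2, "ACGTCG", [("start", 3), ("end", 5)])

def Spec_long_read_cpg_sample_py (r_start : Int) (r_seq : String) (dmr : List (String × Int)) (out : List Int × Int × Int) : Prop := out = long_read_cpg_sample_py_alt r_start r_seq dmr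
instance (r_start : Int) (r_seq : String) (dmr : List (String × Int)) (out : List Int × Int × Int) : Decidable (Spec_long_read_cpg_sample_py r_start r_seq dmr out) := by unfold Spec_long_read_cpg_sample_py; infer_instance

-- ===== CLAIM (what is proved, stated in full; the proofs are below) =====
def Claim_equal_long_read_cpg_sample_py : Prop := ∀ (r_start : Int) (r_seq : String) (dmr : List (String × Int)), Dom_long_read_cpg_sample_py r_start r_seq dmr → Pre_long_read_cpg_sample_py r_start r_seq dmr → Spec_long_read_cpg_sample_py r_start r_seq dmr (long_read_cpg_sample_py r_start r_seq dmr)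

-- ===== LEMMAS AND PROOFS =====

-- If p holds on exactly the first r positions of L, then countP p L = r.
lemma pvCountIdx (p : Int → Bool) : ∀ (L : List Int) (r : Nat), r ≤ L.length →
    (∀ j (hj : j < L.length), (p L[j] = true ↔ j < r)) → L.countP p = r := by
  intro L
  induction L with
  | nil => intro r hr _; simp at hr; simp [hr]
  | cons a t ih =>
    intro r hr h
    cases r with
    | zero =>
      have ha : ¬ p a = true := by simpa using h 0 (by simp)
      have ht : t.countP p = 0 := ih 0 (Nat.zero_le _) (by
        intro j hj
        simpa using h (j + 1) (by simpa using Nat.succ_lt_succ hj))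
      simp [ha, ht]
    | succ r' =>
      have ha : p a = true := (h 0 (by simp)).mpr (Nat.succ_pos _)
      have ht : t.countP p = r' := ih r' (by simpa using hr) (by
        intro j hj
        have := h (j + 1) (by simpa using Nat.succ_lt_succ hj)
        simpa [Nat.succ_lt_succ_iff] using this)
      simp [ha, ht]

lemma pvCountPNot (l : List Int) (p : Int → Bool) :
    l.countP p + l.countP (fun a => !(p a)) = l.length := by
  induction l with
  | nil => simp
  | cons a t ih => by_cases h : p a <;> simp [h] <;> omega

lemma pvBisectLeft_eq (L : List Int) (hL : L.Pairwise (· ≤ ·)) (x : Int) :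
    L.countP (fun j => decide (j < x)) = PySem.List.bisectLeft L x := by
  obtain ⟨hle, hlt, hge⟩ := PySem.List.bisectLeft_spec L x hL
  exact pvCountIdx _ L _ hle (by
    intro j hj
    simp only [decide_eq_true_eq]
    constructor
    · intro hjx
      by_contra hbig
      exact absurd (hge j hj (by omega)) (by omega)
    · exact hlt j hj)

lemma pvBisectRight_eq (L : List Int) (hL : L.Pairwise (· ≤ ·)) (x : Int) :
    L.countP (fun j => decide (j ≤ x)) = PySem.List.bisectRight L x := by
  obtain ⟨hle, hlt, hge⟩ := PySem.List.bisectRight_spec L x hL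
  exact pvCountIdx _ L _ hle (by
    intro j hj
    simp only [decide_eq_true_eq]
    constructor
    · intro hjx
      by_contra hbig
      exact absurd (hge j hj (by omega)) (by omega)
    · exact hlt j hj)

-- Characterisation of A's fused loop (needs s ≤ e so the elif branch is exactly "> e").
lemma pvLoopA (Q : Int → Prop) [DecidablePred Q] (r_start s e : Int) (hse : s ≤ e) :
    ∀ (l : List Int) (acc : List Int × Int × Int),
      l.foldl
        (fun (acc : List Int × Int × Int) (j : Int) =>
          if Q j then
            let acc' : List Int × Int × Int := (acc.1 ++ [j], acc.2.1, acc.2.2)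
            if r_start + j < s then (acc'.1, acc'.2.1 + 1, acc'.2.2)
            else if r_start + j > e then (acc'.1, acc'.2.1, acc'.2.2 + 1)
            else acc'
          else acc) acc
      = (acc.1 ++ l.filter (fun j => decide (Q j)),
         acc.2.1 + ((l.filter (fun j => decide (Q j))).countP (fun j => decide (r_start + j < s)) : Nat),
         acc.2.2 + ((l.filter (fun j => decide (Q j))).countP (fun j => decide (e < r_start + j)) : Nat)) := by
  intro l
  induction l with
  | nil => intro acc; simp
  | cons a t ih =>
    intro acc
    by_cases hQ : Q a
    · by_cases h1 : r_start + a < s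
      · have h2 : ¬ e < r_start + a := by omega
        simp only [List.foldl_cons, ih, List.filter_cons, hQ, h1, h2]
        simp only [decide_true, if_true]
        refine Prod.ext (by simp) (Prod.ext ?_ ?_) <;> (simp [h1, h2]; try ring)
      · by_cases h2 : r_start + a > e
        · simp only [List.foldl_cons, if_pos hQ, if_neg h1, if_pos h2, ih, List.filter_cons]
          simp only [hQ, decide_true, if_true]
          refine Prod.ext (by simp) (Prod.ext ?_ ?_) <;> (simp [h1, h2]; try ring)
        · simp only [List.foldl_cons, if_pos hQ, if_neg h1, if_neg h2, ih, List.filter_cons]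
          simp only [hQ, decide_true, if_true]
          have h2' : ¬ e < r_start + a := h2
          refine Prod.ext (by simp) (Prod.ext ?_ ?_) <;> simp [h1, h2']
    · simp only [List.foldl_cons, if_neg hQ, ih, List.filter_cons]
      simp [hQ]

lemma pvFilterSorted (n : Int) (p : Int → Bool) :
    ((PySem.List.pyRange 0 n 1).filter p).Pairwise (· ≤ ·) := by
  have h := PySem.List.pairwise_lt_pyRange_one (a := 0) (b := n)
  exact (List.Pairwise.sublist List.filter_sublist h).imp (fun h => le_of_lt h)

-- A's loop leaves the accumulator unchanged when no position is a CpG.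
lemma pvLoopA_none (Q : Int → Prop) [DecidablePred Q] (r_start s e : Int)
    (l : List Int) (acc : List Int × Int × Int) (h : ∀ j ∈ l, ¬ Q j) :
    l.foldl
      (fun (acc : List Int × Int × Int) (j : Int) =>
        if Q j then
          let acc' : List Int × Int × Int := (acc.1 ++ [j], acc.2.1, acc.2.2)
          if r_start + j < s then (acc'.1, acc'.2.1 + 1, acc'.2.2)
          else if r_start + j > e then (acc'.1, acc'.2.1, acc'.2.2 + 1)
          else acc'
        else acc) acc = acc := by
  induction l generalizing acc with
  | nil => rfl
  | cons a t ih =>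
    have ha : ¬ Q a := h a (by simp)
    simp only [List.foldl_cons, if_neg ha]
    exact ih acc (fun j hj => h j (by simp [hj]))

-- A CpG hit inside the loop range exhibits "CG" as an infix of the read.
lemma pvSliceInfix (cs : List Char) (j : Int) (hj : 0 ≤ j)
    (hQ : PySem.List.slice cs (some j) (some (j + 2)) = ['C', 'G']) :
    ['C', 'G'] <:+: cs := by
  rw [PySem.List.slice_toNat cs hj (by omega)] at hQ
  rw [← hQ]
  exact ((List.take_prefix _ _).isInfix).trans ((List.drop_suffix _ _).isInfix)

-- ===== VERDICT (by name: the statement is the Claim_ definition above) =====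
theorem long_read_cpg_sample_py_spec : Claim_equal_long_read_cpg_sample_py := by
  intro r_start r_seq dmr _ hpre
  unfold Spec_long_read_cpg_sample_py long_read_cpg_sample_py long_read_cpg_sample_py_alt
  set cs := r_seq.toList with hcs
  set s := (dmr.lookup "start").getD 0 with hs
  set e := (dmr.lookup "end").getD 0 with he
  set L := (PySem.List.pyRange 0 ((cs.length : Int) - 1) 1).filter
      (fun j => decide (PySem.List.slice cs (some j) (some (j + 2)) = ['C', 'G'])) with hL
  by_cases hL0 : L = []
  · -- no CpG position: A's loop never fires, B returns on its early branch
    have hnone : ∀ j ∈ PySem.List.pyRange 0 ((cs.length : Int) - 1) 1,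
        ¬ PySem.List.slice cs (some j) (some (j + 2)) = ['C', 'G'] := by
      intro j hj hQ
      have : j ∈ L := by
        rw [hL, List.mem_filter]
        exact ⟨hj, by simp [hQ]⟩
      simp [hL0] at this
    rw [pvLoopA_none _ r_start s e _ _ hnone, if_pos hL0]
    rw [← hL, hL0]
  · -- some CpG: Pre_'s second disjunct must hold, giving s ≤ e
    have hse : s ≤ e := by
      rcases hpre with hno | ⟨_, _, hse⟩
      · exfalso
        obtain ⟨j, hjL⟩ := List.exists_mem_of_ne_nil L hL0
        rw [hL, List.mem_filter] at hjL
        obtain ⟨hjr, hjQ⟩ := hjL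
        have hj0 : 0 ≤ j := (PySem.List.mem_pyRange_one.mp hjr).1
        exact hno (pvSliceInfix cs j hj0 (by simpa using hjQ))
      · exact hse
    rw [pvLoopA (fun j => PySem.List.slice cs (some j) (some (j + 2)) = ['C', 'G']) r_start s e hse]
    rw [← hL]
    have hsorted : L.Pairwise (· ≤ ·) := pvFilterSorted _ _
    rw [if_neg hL0]
    show _ = (L, ((PySem.List.bisectLeft L (s - r_start) : Nat) : Int),
        (L.length : Int) - ((PySem.List.bisectRight L (e - r_start) : Nat) : Int))
    refine Prod.ext (by simp) (Prod.ext ?_ ?_)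
    · have hcong : L.countP (fun j => decide (r_start + j < s)) =
          L.countP (fun j => decide (j < s - r_start)) := by
        apply List.countP_congr; intro j _; simp only [decide_eq_true_eq]; omega
      rw [zero_add, hcong, pvBisectLeft_eq L hsorted (s - r_start)]
    · have hcong : L.countP (fun j => decide (e < r_start + j)) =
          L.countP (fun j => !(decide (j ≤ e - r_start))) := by
        apply List.countP_congr; intro j _
        simp only [Bool.not_eq_true', decide_eq_true_eq, decide_eq_false_iff_not]
        constructor <;> (intro h; omega)
      have hsplit : L.countP (fun j => decide (j ≤ e - r_start)) +
          L.countP (fun j => !(decide (j ≤ e - r_start))) = L.length :=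
        pvCountPNot _ _
      have hbr := pvBisectRight_eq L hsorted (e - r_start)
      show (0 : Int) + (L.countP (fun j => decide (e < r_start + j)) : Int) =
          (L.length : Int) - ((PySem.List.bisectRight L (e - r_start) : Nat) : Int)
      rw [zero_add, hcong]
      omega
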